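-- pv_equiv track=rewrite | github.com/dingsichen/SPO-QPN | spo_qpn/exact_types.py | _split_square_factor
-- ===== SOURCE A (Python) =====
-- def _split_square_factor(value: int) -> tuple[int, int]:
--     outside = 1
--     inside = value
--     factor = 2
--     while factor * factor <= inside:
--         square = factor * factor
--         while inside % square == 0:
--             outside *= factor
--             inside //= square
--         factor += 1
--     return outside, inside
-- ===== SOURCE B (Python) =====
-- def _split_square_factor(value: int) -> tuple[int, int]:
--     # Full trial-division prime factorization, then combine p**(e//2) / p**(e%2).
--     if value < 2:
--         return 1, value
--     outside = 1
--     inside = 1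
--     n = value
--     f = 2
--     while f * f <= n:
--         e = 0
--         while n % f == 0:
--             n //= f
--             e += 1
--         outside *= f ** (e // 2)
--         inside *= f ** (e % 2)
--         f += 1
--     if n > 1:
--         inside *= n
--     return outside, inside
-- ===== Notes on version B (the rewrite author's own statement) =====
-- stated objective: alternative
-- what changed: B computes a full prime factorization by trial division (dividing by f once per step, counting the multiplicity e) and then combines f**(e//2) into the square part and f**(e%2) into the squarefree part in a separate pass, with an up-front guard returning (1, value) on zero, one and negatives, instead of A's repeated division of the running value by factor**2.
import Mathlib
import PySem

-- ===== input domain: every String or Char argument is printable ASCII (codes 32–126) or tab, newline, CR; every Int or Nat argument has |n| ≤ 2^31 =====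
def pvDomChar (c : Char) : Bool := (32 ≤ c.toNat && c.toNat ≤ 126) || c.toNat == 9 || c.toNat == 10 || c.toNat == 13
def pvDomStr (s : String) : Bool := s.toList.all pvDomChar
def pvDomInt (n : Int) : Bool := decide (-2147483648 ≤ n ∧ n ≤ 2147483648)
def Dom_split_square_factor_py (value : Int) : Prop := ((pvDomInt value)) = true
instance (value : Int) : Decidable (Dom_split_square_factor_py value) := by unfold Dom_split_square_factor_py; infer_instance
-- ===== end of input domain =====

-- B replaces A's divide-by-factor² square extraction with a full prime factorization
-- (multiplicity counting) and a separate combine of p^(e/2) / p^(e%2): alternative decomposition.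

-- ===== PORT A =====
-- Inner 'while inside % square == 0' loop. The extra '2 ≤ factor ∧ 0 < inside' in the
-- guard is a totality guard only: the entry point always satisfies it when the Python
-- loop body runs (the outer guard gives inside ≥ factor*factor ≥ 4).
def aInner (factor outside inside : Nat) : Nat × Nat :=
  if h : 2 ≤ factor ∧ 0 < inside ∧ inside % (factor * factor) = 0 then
    aInner factor (outside * factor) (inside / (factor * factor))
  else (outside, inside)
termination_by inside
decreasing_by
  exact Nat.div_lt_self h.2.1 (by nlinarith [h.1])

theorem aInner_snd_le (factor outside inside : Nat) : (aInner factor outside inside).2 ≤ inside := by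
  fun_induction aInner factor outside inside with
  | case1 o i h ih => exact le_trans ih (Nat.div_le_self _ _)
  | case2 => simp

-- Outer 'while factor * factor <= inside' loop of A.
def aOuter (factor outside inside : Nat) : Nat × Nat :=
  if h : factor * factor ≤ inside then
    let r := aInner factor outside inside
    aOuter (factor + 1) r.1 r.2
  else (outside, inside)
termination_by inside + 2 - factor
decreasing_by
  have h1 := aInner_snd_le factor outside inside
  have h2 : factor ≤ factor * factor := by nlinarith
  omega

-- For value < 4 the Python loop guard 2*2 <= inside fails at once and A returns (1, value);
-- for value ≥ 4 every quantity stays nonnegative, so the loop runs exactly over Nat.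
def split_square_factor_py (value : Int) : Int × Int :=
  if value < 4 then (1, value)
  else
    let r := aOuter 2 1 value.toNat
    ((r.1 : Int), (r.2 : Int))

-- ===== PORT B =====
-- 'while n % f == 0: n //= f; e += 1'  (totality guard as above)
def bStrip (f n : Nat) : Nat × Nat :=
  if h : 2 ≤ f ∧ 0 < n ∧ n % f = 0 then
    let r := bStrip f (n / f)
    (r.1 + 1, r.2)
  else (0, n)
termination_by n
decreasing_by
  exact Nat.div_lt_self h.2.1 (by omega)

theorem bStrip_snd_le (f n : Nat) : (bStrip f n).2 ≤ n := by
  fun_induction bStrip f n with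
  | case1 n h r ih => exact le_trans ih (Nat.div_le_self _ _)
  | case2 => simp

-- 'while f * f <= n' loop of B: counts the multiplicity e of f, accumulates f^(e/2), f^(e%2).
def bLoop (f outside inside n : Nat) : Nat × Nat × Nat :=
  if h : f * f ≤ n then
    let r := bStrip f n
    bLoop (f + 1) (outside * f ^ (r.1 / 2)) (inside * f ^ (r.1 % 2)) r.2
  else (outside, inside, n)
termination_by n + 2 - f
decreasing_by
  have h1 := bStrip_snd_le f n
  have h2 : f ≤ f * f := by nlinarith
  omega

def split_square_factor_py_alt (value : Int) : Int × Int :=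
  if value < 2 then (1, value)
  else
    let r := bLoop 2 1 1 value.toNat
    ((r.1 : Int), ((if 1 < r.2.2 then r.2.1 * r.2.2 else r.2.1 : Nat) : Int))

-- ===== PRECONDITION & SPEC =====
def Spec_split_square_factor_py (value : Int) (out : Int × Int) : Prop := out = split_square_factor_py_alt value
instance (value : Int) (out : Int × Int) : Decidable (Spec_split_square_factor_py value out) := by unfold Spec_split_square_factor_py; infer_instance

-- ===== CLAIM (what is proved, stated in full; the proofs are below) =====
def Claim_equal_split_square_factor_py : Prop := ∀ (value : Int), Dom_split_square_factor_py value → Spec_split_square_factor_py value (split_square_factor_py value)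

-- ===== LEMMAS AND PROOFS =====

theorem aInner_spec (factor outside inside : Nat) (hf : 2 ≤ factor) :
    0 < inside →
    (aInner factor outside inside).1 ^ 2 * (aInner factor outside inside).2 = outside ^ 2 * inside ∧
    0 < (aInner factor outside inside).2 ∧
    ¬ (factor * factor ∣ (aInner factor outside inside).2) ∧
    (aInner factor outside inside).2 ∣ inside := by
  fun_induction aInner factor outside inside with
  | case1 o i h ih =>
    intro hi
    have hdvd : factor * factor ∣ i := (Nat.dvd_iff_mod_eq_zero).2 h.2.2
    have hpos : 0 < i / (factor * factor) :=
      Nat.div_pos (Nat.le_of_dvd h.2.1 hdvd) (by nlinarith [h.1])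
    obtain ⟨h1, h2, h3, h4⟩ := ih hpos
    refine ⟨?_, h2, h3, h4.trans (Nat.div_dvd_of_dvd hdvd)⟩
    rw [h1]
    have hmul : factor * factor * (i / (factor * factor)) = i := Nat.mul_div_cancel' hdvd
    calc (o * factor) ^ 2 * (i / (factor * factor))
        = o ^ 2 * (factor * factor * (i / (factor * factor))) := by ring
      _ = o ^ 2 * i := by rw [hmul]
  | case2 o i h =>
    intro hi
    refine ⟨rfl, hi, ?_, dvd_rfl⟩
    intro hd
    exact h ⟨hf, hi, (Nat.dvd_iff_mod_eq_zero).1 hd⟩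

theorem aOuter_good (factor outside inside : Nat) :
    2 ≤ factor → 0 < inside →
    (∀ m, 2 ≤ m → m < factor → ¬ (m * m ∣ inside)) →
    (aOuter factor outside inside).1 ^ 2 * (aOuter factor outside inside).2 = outside ^ 2 * inside ∧
    Squarefree (aOuter factor outside inside).2 ∧
    0 < (aOuter factor outside inside).2 := by
  fun_induction aOuter factor outside inside with
  | case1 f o i h r ih =>
    intro hf hi hinv
    obtain ⟨h1, h2, h3, h4⟩ := aInner_spec f o i hf hi
    have hinv' : ∀ m, 2 ≤ m → m < f + 1 → ¬ (m * m ∣ (aInner f o i).2) := by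
      intro m hm2 hmf hd
      rcases Nat.lt_or_ge m f with hlt | hge
      · exact hinv m hm2 hlt (hd.trans h4)
      · have : m = f := by omega
        subst this; exact h3 hd
    obtain ⟨g1, g2, g3⟩ := ih (by omega) h2 hinv'
    exact ⟨by rw [g1, h1], g2, g3⟩
  | case2 f o i h =>
    intro hf hi hinv
    refine ⟨rfl, ?_, hi⟩
    intro x hx
    rw [Nat.isUnit_iff]
    by_contra hx1
    have hx0 : x ≠ 0 := by rintro rfl; simp at hx; omega
    have hx2 : 2 ≤ x := by omega
    have hxle : x * x ≤ i := Nat.le_of_dvd hi hx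
    rcases Nat.lt_or_ge x f with hlt | hge
    · exact hinv x hx2 hlt hx
    · have : f * f ≤ x * x := Nat.mul_le_mul hge hge
      omega

theorem bStrip_spec (f n : Nat) (hf : 2 ≤ f) :
    0 < n →
    f ^ (bStrip f n).1 * (bStrip f n).2 = n ∧
    0 < (bStrip f n).2 ∧
    ¬ f ∣ (bStrip f n).2 ∧
    (bStrip f n).2 ∣ n := by
  fun_induction bStrip f n with
  | case1 n h r ih =>
    intro hn
    have hdvd : f ∣ n := (Nat.dvd_iff_mod_eq_zero).2 h.2.2
    have hpos : 0 < n / f := Nat.div_pos (Nat.le_of_dvd h.2.1 hdvd) (by omega)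
    obtain ⟨h1, h2, h3, h4⟩ := ih hpos
    refine ⟨?_, h2, h3, h4.trans (Nat.div_dvd_of_dvd hdvd)⟩
    have hmul : f * (n / f) = n := Nat.mul_div_cancel' hdvd
    calc f ^ ((bStrip f (n / f)).1 + 1) * (bStrip f (n / f)).2
        = f * (f ^ (bStrip f (n / f)).1 * (bStrip f (n / f)).2) := by ring
      _ = f * (n / f) := by rw [h1]
      _ = n := hmul
  | case2 n h =>
    intro hn
    refine ⟨by simp, hn, ?_, dvd_rfl⟩
    intro hd
    exact h ⟨hf, hn, (Nat.dvd_iff_mod_eq_zero).1 hd⟩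

-- the value B finally returns (second component combined with the leftover cofactor)
def bCombine (r : Nat × Nat × Nat) : Nat := if 1 < r.2.2 then r.2.1 * r.2.2 else r.2.1

theorem bLoop_good (f outside inside n : Nat) :
    2 ≤ f → 0 < n → 0 < inside →
    (∀ m, 2 ≤ m → m < f → ¬ m ∣ n) →
    Squarefree inside →
    (∀ p, Nat.Prime p → p ∣ inside → p < f) →
    (bLoop f outside inside n).1 ^ 2 * bCombine (bLoop f outside inside n) = outside ^ 2 * inside * n ∧
    Squarefree (bCombine (bLoop f outside inside n)) := by
  fun_induction bLoop f outside inside n with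
  | case1 f o i n h r ih =>
    intro hf hn hi hinv hsf hip
    obtain ⟨h1, h2, h3, h4⟩ := bStrip_spec f n hf hn
    have hfprime : (bStrip f n).1 ≠ 0 → Nat.Prime f := by
      intro he
      have hfd : f ∣ n := by
        have hpow : f ∣ f ^ (bStrip f n).1 := dvd_pow_self f he
        exact (hpow.mul_right (bStrip f n).2).trans (dvd_of_eq h1)
      refine Nat.prime_def_lt.2 ⟨hf, ?_⟩
      intro m hmf hmd
      by_contra hm1
      have hm0 : m ≠ 0 := by rintro rfl; simp at hmd; omega
      exact hinv m (by omega) hmf (hmd.trans hfd)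
    have hfi : Nat.Prime f → ¬ f ∣ i := by
      intro hp hd
      have := hip f hp hd
      omega
    have hnewsf : Squarefree (i * f ^ ((bStrip f n).1 % 2)) := by
      rcases Nat.mod_two_eq_zero_or_one (bStrip f n).1 with he | he
      · rw [he]; simpa using hsf
      · rw [he, pow_one]
        have hp : Nat.Prime f := hfprime (by omega)
        have hco : Nat.Coprime i f := ((Nat.Prime.coprime_iff_not_dvd hp).2 (hfi hp)).symm
        exact (Nat.squarefree_mul hco).2 ⟨hsf, hp.prime.squarefree⟩
    have hnewip : ∀ p, Nat.Prime p → p ∣ i * f ^ ((bStrip f n).1 % 2) → p < f + 1 := by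
      intro p hp hpd
      rcases (Nat.Prime.dvd_mul hp).1 hpd with hd | hd
      · exact lt_trans (hip p hp hd) (by omega)
      · rcases Nat.mod_two_eq_zero_or_one (bStrip f n).1 with he | he
        · rw [he, pow_zero] at hd
          exact absurd (Nat.le_of_dvd one_pos hd) (by have := hp.two_le; omega)
        · rw [he, pow_one] at hd
          have hpf : p = f := (Nat.prime_dvd_prime_iff_eq hp (hfprime (by omega))).1 hd
          omega
    have hnewinv : ∀ m, 2 ≤ m → m < f + 1 → ¬ m ∣ (bStrip f n).2 := by
      intro m hm2 hmf hd
      rcases Nat.lt_or_ge m f with hlt | hge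
      · exact hinv m hm2 hlt (hd.trans h4)
      · have : m = f := by omega
        subst this; exact h3 hd
    have hipos : 0 < i * f ^ ((bStrip f n).1 % 2) :=
      Nat.mul_pos hi (pow_pos (by omega) _)
    obtain ⟨g1, g2⟩ := ih (by omega) h2 hipos hnewinv hnewsf hnewip
    refine ⟨?_, g2⟩
    rw [g1]
    have hsplit : (bStrip f n).1 = 2 * ((bStrip f n).1 / 2) + (bStrip f n).1 % 2 := by omega
    calc (o * f ^ ((bStrip f n).1 / 2)) ^ 2 * (i * f ^ ((bStrip f n).1 % 2)) * (bStrip f n).2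
        = o ^ 2 * i * (f ^ (2 * ((bStrip f n).1 / 2) + (bStrip f n).1 % 2) * (bStrip f n).2) := by
          rw [pow_add, pow_mul]; ring
      _ = o ^ 2 * i * (f ^ (bStrip f n).1 * (bStrip f n).2) := by rw [← hsplit]
      _ = o ^ 2 * i * n := by rw [h1]
  | case2 f o i n h =>
    intro hf hn hi hinv hsf hip
    rcases Nat.lt_or_ge 1 n with hn1 | hn1
    · have hnp : Nat.Prime n := by
        by_contra hnotp
        have hsq := Nat.minFac_sq_le_self hn hnotp
        have hpd : n.minFac ∣ n := Nat.minFac_dvd n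
        have hp2 : 2 ≤ n.minFac := (Nat.minFac_prime (by omega)).two_le
        have hge : f ≤ n.minFac := by
          by_contra hlt
          exact hinv n.minFac hp2 (by omega) hpd
        have hle : f * f ≤ n.minFac * n.minFac := Nat.mul_le_mul hge hge
        have : f * f ≤ n := le_trans hle (by nlinarith [hsq])
        omega
      have hfn : f ≤ n := by
        by_contra hlt
        exact hinv n hnp.two_le (by omega) dvd_rfl
      have hni : ¬ n ∣ i := by
        intro hd
        have := hip n hnp hd
        omega
      have hco : Nat.Coprime i n := ((Nat.Prime.coprime_iff_not_dvd hnp).2 hni).symm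
      have hsfin : Squarefree (i * n) := (Nat.squarefree_mul hco).2 ⟨hsf, hnp.prime.squarefree⟩
      unfold bCombine
      simp only [hn1, if_pos]
      exact ⟨by ring, hsfin⟩
    · have hone : n = 1 := by omega
      subst hone
      unfold bCombine
      simp only [show ¬ (1:Nat) < 1 by omega, if_neg, not_false_iff]
      exact ⟨by ring, hsf⟩

-- uniqueness of the (square part, squarefree part) decomposition, via factorization parity
theorem sq_sf_unique {a b c d : Nat} (hb : Squarefree b) (hd : Squarefree d)
    (h : a ^ 2 * b = c ^ 2 * d) (hpos : 0 < a ^ 2 * b) : a = c ∧ b = d := by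
  have ha0 : a ≠ 0 := by rintro rfl; simp at hpos
  have hb0 : b ≠ 0 := hb.ne_zero
  have hd0 : d ≠ 0 := hd.ne_zero
  have hc0 : c ≠ 0 := by rintro rfl; rw [h] at hpos; simp at hpos
  have key : ∀ p, b.factorization p = d.factorization p ∧ a.factorization p = c.factorization p := by
    intro p
    have e1 : (a ^ 2 * b).factorization p = 2 * a.factorization p + b.factorization p := by
      rw [Nat.factorization_mul (pow_ne_zero 2 ha0) hb0, Nat.factorization_pow]
      simp [mul_comm]
    have e2 : (c ^ 2 * d).factorization p = 2 * c.factorization p + d.factorization p := by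
      rw [Nat.factorization_mul (pow_ne_zero 2 hc0) hd0, Nat.factorization_pow]
      simp [mul_comm]
    have hble := hb.natFactorization_le_one p
    have hdle := hd.natFactorization_le_one p
    rw [h, e2] at e1
    omega
  have hbd : b = d := by
    apply Nat.factorization_inj (by simpa using hb0) (by simpa using hd0)
    ext p
    exact (key p).1
  refine ⟨?_, hbd⟩
  subst hbd
  have : a ^ 2 = c ^ 2 := Nat.eq_of_mul_eq_mul_right (Nat.pos_of_ne_zero hb0) h
  exact Nat.pow_left_injective (by omega) this

-- the two Nat-level loops agree on every positive input
theorem nat_eq (n : Nat) (hn : 0 < n) :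
    aOuter 2 1 n = ((bLoop 2 1 1 n).1, bCombine (bLoop 2 1 1 n)) := by
  obtain ⟨a1, a2, a3⟩ := aOuter_good 2 1 n (by omega) hn (by intro m hm2 hmf; omega)
  obtain ⟨b1, b2⟩ := bLoop_good 2 1 1 n (by omega) hn (by omega)
    (by intro m hm2 hmf; omega) squarefree_one
    (by intro p hp hpd; exact absurd (Nat.le_of_dvd one_pos hpd) (by have := hp.two_le; omega))
  simp only [one_pow, one_mul] at a1 b1
  have heq : (aOuter 2 1 n).1 ^ 2 * (aOuter 2 1 n).2
      = (bLoop 2 1 1 n).1 ^ 2 * bCombine (bLoop 2 1 1 n) := by rw [a1, b1]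
  have hpos : 0 < (aOuter 2 1 n).1 ^ 2 * (aOuter 2 1 n).2 := by rw [a1]; exact hn
  obtain ⟨e1, e2⟩ := sq_sf_unique a2 b2 heq hpos
  exact Prod.ext e1 e2

theorem aOuter_small (n : Nat) (h : n < 4) : aOuter 2 1 n = (1, n) := by
  rw [aOuter]
  simp [show ¬ 2 * 2 ≤ n by omega]

-- ===== VERDICT (by name: the statement is the Claim_ definition above) =====
theorem split_square_factor_py_spec : Claim_equal_split_square_factor_py := by
  intro value _
  unfold Spec_split_square_factor_py split_square_factor_py split_square_factor_py_alt
  rcases Int.lt_or_le value 2 with h2 | h2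
  · simp [show value < 4 by omega, h2]
  · have hv0 : 0 ≤ value := by omega
    have hnpos : 0 < value.toNat := by omega
    have hne := nat_eq value.toNat hnpos
    simp only [show ¬ value < 2 by omega, if_neg, not_false_iff]
    rcases Int.lt_or_le value 4 with h4 | h4
    · simp only [h4, if_pos]
      rw [aOuter_small value.toNat (by omega)] at hne
      have h1 : 1 = (bLoop 2 1 1 value.toNat).1 := congrArg Prod.fst hne
      have hc : value.toNat = bCombine (bLoop 2 1 1 value.toNat) := congrArg Prod.snd hne
      unfold bCombine at hc
      rw [← h1, ← hc, Int.toNat_of_nonneg hv0]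
      simp
    · simp only [show ¬ value < 4 by omega, if_neg, not_false_iff]
      have h1 : (aOuter 2 1 value.toNat).1 = (bLoop 2 1 1 value.toNat).1 := congrArg Prod.fst hne
      have hc : (aOuter 2 1 value.toNat).2 = bCombine (bLoop 2 1 1 value.toNat) := congrArg Prod.snd hne
      unfold bCombine at hc
      rw [h1, hc]
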